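-- pv_equiv track=rewrite | github.com/grzesikluk/projecteuler | src/main/java/eulerproject/level5/problem107/solution.py | getSublistsWithSameWeight
-- ===== SOURCE A (Python) =====
-- def getSublistsWithSameWeight(sortedEdges):
--     lastWeight = -1
--     beginning = 0
--     indexes = []
--
--     for i in range(len(sortedEdges) - 1):
--         if sortedEdges[i][1] == sortedEdges[i + 1][1]:
--             if lastWeight != sortedEdges[i]:
--                 beginning = i
--                 lastWeight = sortedEdges[i][1]
--         else:
--             if lastWeight != -1:
--                 indexes.append([beginning, i])
--             beginning = 0
--             lastWeight = -1
--
--     return indexes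
-- ===== SOURCE B (Python) =====
-- def getSublistsWithSameWeight(sortedEdges):
--     weights = [e[1] for e in sortedEdges]
--     return [[i - 1, i]
--             for i in range(1, len(weights) - 1)
--             if weights[i - 1] == weights[i] and weights[i] != weights[i + 1]]
-- ===== Notes on version B (the rewrite author's own statement) =====
-- stated objective: simpler
-- what changed: Replaced the lastWeight/beginning state machine (whose int-vs-tuple comparison always fires) by a stateless comprehension that emits [i-1,i] exactly at each right boundary of a weight run, dropping the -1 sentinel.
-- intended difference: On lists containing an interior run of edges with weight -1 ending before a different weight, A silently emits nothing for that run because -1 is also its 'no run' sentinel, while B emits [i-1,i] there like for any other weight, which is the intended behaviour since -1 is a legitimate edge weight. — e.g. on getSublistsWithSameWeight([(0, -1), (0, -1), (0, 0)]): A returns [], B returns [[0, 1]]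
import Mathlib
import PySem

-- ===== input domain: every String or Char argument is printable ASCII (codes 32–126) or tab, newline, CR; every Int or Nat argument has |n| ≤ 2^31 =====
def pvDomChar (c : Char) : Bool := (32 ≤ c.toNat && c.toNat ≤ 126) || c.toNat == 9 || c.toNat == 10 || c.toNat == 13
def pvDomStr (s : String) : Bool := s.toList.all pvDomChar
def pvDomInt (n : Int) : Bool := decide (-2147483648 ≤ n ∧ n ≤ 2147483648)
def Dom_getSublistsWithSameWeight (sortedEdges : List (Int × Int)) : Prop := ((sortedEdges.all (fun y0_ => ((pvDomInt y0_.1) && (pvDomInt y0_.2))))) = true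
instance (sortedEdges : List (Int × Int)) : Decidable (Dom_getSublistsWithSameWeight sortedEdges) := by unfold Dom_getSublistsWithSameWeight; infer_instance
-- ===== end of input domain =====

-- B replaces A's lastWeight/beginning state machine by a stateless boundary scan (simpler);
-- on interior runs of weight -1 (A's sentinel) B intentionally differs, see D_ below.

-- ===== PORT A =====
-- Loop body of A, extracted as a helper; state is (lastWeight, beginning, indexes).
-- Python's inner test `lastWeight != sortedEdges[i]` compares an int with a tuple and is
-- therefore always True, so that branch is transliterated as unconditional (exact).
def pvBodyA (sortedEdges : List (Int × Int)) (st : Int × Int × List (List Int)) (i : Int) :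
    Int × Int × List (List Int) :=
  if (PySem.List.pyGetD sortedEdges i (0, 0)).2
      = (PySem.List.pyGetD sortedEdges (i + 1) (0, 0)).2 then
    ((PySem.List.pyGetD sortedEdges i (0, 0)).2, i, st.2.2)
  else
    if st.1 ≠ -1 then (-1, 0, st.2.2 ++ [[st.2.1, i]])
    else (-1, 0, st.2.2)

def getSublistsWithSameWeight (sortedEdges : List (Int × Int)) : List (List Int) :=
  ((PySem.List.pyRange 0 ((sortedEdges.length : Int) - 1) 1).foldl
    (pvBodyA sortedEdges) (-1, 0, [])).2.2

-- ===== PORT B =====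
def getSublistsWithSameWeight_alt (sortedEdges : List (Int × Int)) : List (List Int) :=
  let weights := sortedEdges.map (fun e => e.2)
  ((PySem.List.pyRange 1 ((weights.length : Int) - 1) 1).filter
    (fun i => (PySem.List.pyGetD weights (i - 1) 0 == PySem.List.pyGetD weights i 0)
        && (PySem.List.pyGetD weights i 0 != PySem.List.pyGetD weights (i + 1) 0))).map
    (fun i => [i - 1, i])

-- ===== PRECONDITION & SPEC =====
-- A uses -1 both as a legitimate edge weight and as its 'no run' sentinel: on lists with an
-- interior run of weight -1 ending before a different weight, A silently omits that run's
-- [i-1, i] entry while B reports it like any other weight, which is the intended behaviour.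
def D_getSublistsWithSameWeight (sortedEdges : List (Int × Int)) : Prop :=
  ∃ c ∈ sortedEdges.map Prod.snd, c ≠ -1 ∧ [-1, -1, c] <:+: sortedEdges.map Prod.snd
instance (sortedEdges : List (Int × Int)) : Decidable (D_getSublistsWithSameWeight sortedEdges) := by
  unfold D_getSublistsWithSameWeight; infer_instance

def Spec_getSublistsWithSameWeight (sortedEdges : List (Int × Int)) (out : List (List Int)) : Prop :=
  ¬ D_getSublistsWithSameWeight sortedEdges → out = getSublistsWithSameWeight_alt sortedEdges
instance (sortedEdges : List (Int × Int)) (out : List (List Int)) : Decidable (Spec_getSublistsWithSameWeight sortedEdges out) := by unfold Spec_getSublistsWithSameWeight; infer_instance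

def pvDiffWitness_getSublistsWithSameWeight : List (Int × Int) := [(0, -1), (0, -1), (0, 0)]
def pvDiffWitnessOut_getSublistsWithSameWeight : (List (List Int)) × (List (List Int)) :=
  ([], [[0, 1]])

-- ===== CLAIM (what is proved, stated in full; the proofs are below) =====
def Claim_unchanged_getSublistsWithSameWeight : Prop := ∀ (sortedEdges : List (Int × Int)), Dom_getSublistsWithSameWeight sortedEdges → Spec_getSublistsWithSameWeight sortedEdges (getSublistsWithSameWeight sortedEdges)
def Claim_changed_getSublistsWithSameWeight : Prop := Dom_getSublistsWithSameWeight (pvDiffWitness_getSublistsWithSameWeight) ∧ D_getSublistsWithSameWeight (pvDiffWitness_getSublistsWithSameWeight) ∧ getSublistsWithSameWeight (pvDiffWitness_getSublistsWithSameWeight) = pvDiffWitnessOut_getSublistsWithSameWeight.1 ∧ getSublistsWithSameWeight_alt (pvDiffWitness_getSublistsWithSameWeight) = pvDiffWitnessOut_getSublistsWithSameWeight.2 ∧ pvDiffWitnessOut_getSublistsWithSameWeight.1 ≠ pvDiffWitnessOut_getSublistsWithSameWeight.2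
def Claim_exact_getSublistsWithSameWeight : Prop := ∀ (sortedEdges : List (Int × Int)), Dom_getSublistsWithSameWeight sortedEdges → D_getSublistsWithSameWeight sortedEdges → getSublistsWithSameWeight sortedEdges ≠ getSublistsWithSameWeight_alt sortedEdges

-- ===== LEMMAS AND PROOFS =====

-- weight of edge i (0 out of range, matching the ports' defaulted indexing)
def pvW (xs : List (Int × Int)) (i : Nat) : Int := (xs[i]?.getD (0, 0)).2

-- emission predicates, as functions of the index
def pvPA (xs : List (Int × Int)) (i : Nat) : Bool :=
  decide (1 ≤ i) && (pvW xs (i - 1) == pvW xs i) && (pvW xs i != pvW xs (i + 1))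
    && (pvW xs i != -1)
def pvPB (xs : List (Int × Int)) (i : Nat) : Bool :=
  decide (1 ≤ i) && (pvW xs (i - 1) == pvW xs i) && (pvW xs i != pvW xs (i + 1))

lemma pvW_map (xs : List (Int × Int)) (k : Nat) :
    (xs.map (fun e : Int × Int => e.2)).getD k 0 = pvW xs k := by
  induction xs generalizing k with
  | nil => simp [pvW]
  | cons x xs ih => cases k with
    | zero => simp [pvW]
    | succ k => simpa [pvW] using ih k

-- invariant of A's loop after m iterations
lemma pvLoopA (xs : List (Int × Int)) (m : Nat) :
    (PySem.List.pyRange 0 (m : Int) 1).foldl (pvBodyA xs) (-1, 0, []) =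
      ((if m = 0 then -1 else if pvW xs (m - 1) = pvW xs m then pvW xs (m - 1) else -1 : Int),
       (if m = 0 then 0 else if pvW xs (m - 1) = pvW xs m then (m : Int) - 1 else 0 : Int),
       ((List.range m).filter (pvPA xs)).map (fun i : Nat => ([(i : Int) - 1, (i : Int)] : List Int))) := by
  induction m with
  | zero => simp [PySem.List.pyRange_one_eq_nil]
  | succ m ih =>
    have hcast : ((m + 1 : Nat) : Int) = (m : Int) + 1 := by push_cast; ring
    rw [hcast, PySem.List.pyRange_one_succ_right (by positivity), List.foldl_append, ih]
    simp only [List.foldl_cons, List.foldl_nil]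
    have hget : (PySem.List.pyGetD xs (m : Int) (0, 0)).2 = pvW xs m := by
      simp [pvW]
    have hget1 : (PySem.List.pyGetD xs ((m : Int) + 1) (0, 0)).2 = pvW xs (m + 1) := by
      rw [show ((m : Int) + 1) = ((m + 1 : Nat) : Int) from by push_cast; ring,
        PySem.List.pyGetD_natCast]
      simp [pvW, List.getD_eq_getElem?_getD]
    unfold pvBodyA
    rw [hget, hget1]
    simp only [List.range_succ, List.filter_append, List.map_append, List.filter_cons,
      List.filter_nil]
    by_cases h1 : pvW xs m = pvW xs (m + 1)
    · have hpa : pvPA xs m = false := by simp [pvPA, h1]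
      simp [h1, hpa]
    · by_cases h0 : m = 0
      · subst h0
        have hpa : pvPA xs 0 = false := by simp [pvPA]
        simp [h1, hpa]
      · by_cases h2 : pvW xs (m - 1) = pvW xs m
        · by_cases h3 : pvW xs (m - 1) = -1
          · have hm : pvW xs m = -1 := h2 ▸ h3
            have h1' : ¬((-1 : Int) = pvW xs (m + 1)) := hm ▸ h1
            have hpa : pvPA xs m = false := by simp [pvPA, hm]
            simp [h0, h2, hm, h1', hpa]
          · have hm : pvW xs m ≠ -1 := h2 ▸ h3
            have hpa : pvPA xs m = true := by
              simp [pvPA, h1, h2, hm, Nat.one_le_iff_ne_zero, h0]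
            simp [h1, h0, h2, hm, hpa]
        · have hpa : pvPA xs m = false := by simp [pvPA, h2]
          simp [h1, h0, h2, hpa]

lemma pvAChar (xs : List (Int × Int)) :
    getSublistsWithSameWeight xs =
      ((List.range (xs.length - 1)).filter (pvPA xs)).map
        (fun i : Nat => ([(i : Int) - 1, (i : Int)] : List Int)) := by
  unfold getSublistsWithSameWeight
  rcases Nat.eq_zero_or_pos xs.length with h | h
  · rw [h]; simp [PySem.List.pyRange_one_eq_nil]
  · have hcast : ((xs.length : Int) - 1) = ((xs.length - 1 : Nat) : Int) := by
      omega
    rw [hcast, pvLoopA]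

lemma pvMapFilterCongr {α β : Type} (f g : α → β) (p q : α → Bool) (l : List α)
    (hf : ∀ a, f a = g a) (hp : ∀ a, p a = q a) :
    (l.filter p).map f = (l.filter q).map g := by
  have hpq : p = q := funext hp
  subst hpq
  exact List.map_congr_left (fun a _ => hf a)

lemma pvBChar (xs : List (Int × Int)) :
    getSublistsWithSameWeight_alt xs =
      ((List.range (xs.length - 1)).filter (pvPB xs)).map
        (fun i : Nat => ([(i : Int) - 1, (i : Int)] : List Int)) := by
  unfold getSublistsWithSameWeight_alt
  simp only [List.length_map]
  rcases Nat.lt_or_ge xs.length 2 with h | h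
  · have h01 : xs.length = 0 ∨ xs.length = 1 := by omega
    rcases h01 with h0 | h0 <;> rw [h0]
    · rw [show ((0 : Nat) : Int) - 1 = -1 from by norm_num,
        PySem.List.pyRange_one_eq_nil (by norm_num)]
      simp
    · rw [show ((1 : Nat) : Int) - 1 = 0 from by norm_num,
        PySem.List.pyRange_one_eq_nil (by norm_num)]
      simp
  · have hcast : ((xs.length : Int) - 1) = ((1 : Nat) : Int) + ((xs.length - 2 : Nat) : Int) := by
      omega
    rw [hcast, PySem.List.pyRange_one,
      show ((((1 : Nat) : Int) + ((xs.length - 2 : Nat) : Int)) - 1).toNat = xs.length - 2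
        from by omega]
    have hrange : List.range (xs.length - 1) = 0 :: (List.range (xs.length - 2)).map Nat.succ := by
      have h2 : xs.length - 1 = (xs.length - 2) + 1 := by omega
      rw [h2, List.range_succ_eq_map]
    rw [hrange, List.filter_cons]
    have hp0 : pvPB xs 0 = false := by simp [pvPB]
    rw [hp0]
    simp only [Bool.false_eq_true, if_false]
    rw [List.filter_map, List.filter_map, List.map_map, List.map_map]
    apply pvMapFilterCongr
    · intro k
      simp only [Function.comp_apply, Nat.succ_eq_add_one]
      push_cast
      ring_nf
    · intro k
      simp only [Function.comp_apply, Nat.succ_eq_add_one]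
      rw [show (1 : Int) + (k : Int) - 1 = ((k : Nat) : Int) from by ring,
        show (1 : Int) + (k : Int) = ((k + 1 : Nat) : Int) from by push_cast; ring,
        show ((k + 1 : Nat) : Int) + 1 = ((k + 2 : Nat) : Int) from by push_cast; ring,
        PySem.List.pyGetD_natCast, PySem.List.pyGetD_natCast, PySem.List.pyGetD_natCast,
        pvW_map, pvW_map, pvW_map]
      simp [pvPB, show k + 1 - 1 = k from rfl]

lemma pvDropThree {l : List Int} {a : Nat} (h : a + 2 < l.length) :
    l.drop a = l.getD a 0 :: l.getD (a + 1) 0 :: l.getD (a + 2) 0 :: l.drop (a + 3) := by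
  have h0 : a < l.length := by omega
  have h1 : a + 1 < l.length := by omega
  rw [List.drop_eq_getElem_cons h0, List.drop_eq_getElem_cons h1, List.drop_eq_getElem_cons h]
  simp only [List.getD_eq_getElem?_getD, List.getElem?_eq_getElem h0,
    List.getElem?_eq_getElem h1, List.getElem?_eq_getElem h, Option.getD_some]

-- D_ restated through pvW, the form the characterisations use
lemma pvD_char (xs : List (Int × Int)) :
    D_getSublistsWithSameWeight xs ↔
      ∃ i, 1 ≤ i ∧ i + 1 < xs.length ∧ pvW xs (i - 1) = -1 ∧ pvW xs i = -1 ∧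
        pvW xs (i + 1) ≠ -1 := by
  unfold D_getSublistsWithSameWeight
  have hw : ∀ j, (xs.map Prod.snd).getD j 0 = pvW xs j := by
    intro j
    simpa using pvW_map xs j
  have hlen : (xs.map Prod.snd).length = xs.length := by simp
  constructor
  · rintro ⟨c, -, hc, s, t, h⟩
    have hl : s.length + 2 < xs.length := by
      have := congrArg List.length h
      simp at this
      omega
    have hdrop : (xs.map Prod.snd).drop s.length = [-1, -1, c] ++ t := by
      rw [← h, List.append_assoc, List.drop_left]
    rw [pvDropThree (by omega)] at hdrop
    simp only [List.cons_append, List.nil_append, List.cons.injEq] at hdrop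
    refine ⟨s.length + 1, by omega, by omega, ?_, ?_, ?_⟩
    · rw [show s.length + 1 - 1 = s.length from by omega, ← hw s.length, hdrop.1]
    · rw [← hw (s.length + 1), hdrop.2.1]
    · rw [← hw (s.length + 2), hdrop.2.2.1]
      exact hc
  · rintro ⟨i, h1, hlt, ha, hb, hc⟩
    have hl : (i - 1) + 2 < (xs.map Prod.snd).length := by rw [hlen]; omega
    have hdec := List.take_append_drop (i - 1) (xs.map Prod.snd)
    rw [pvDropThree hl] at hdec
    rw [show i - 1 + 1 = i from by omega, show i - 1 + 2 = i + 1 from by omega,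
      hw, hw, hw, ha, hb] at hdec
    refine ⟨pvW xs (i + 1), ?_, hc, (xs.map Prod.snd).take (i - 1),
      (xs.map Prod.snd).drop (i - 1 + 3), ?_⟩
    · rw [← hw (i + 1), List.getD_eq_getElem?_getD,
        List.getElem?_eq_getElem (show i + 1 < (xs.map Prod.snd).length from by rw [hlen]; omega)]
      rw [Option.getD_some]
      exact List.getElem_mem _
    · simpa using hdec
-- ===== VERDICT (by name: the statement is the Claim_ definition above) =====
theorem getSublistsWithSameWeight_spec : Claim_unchanged_getSublistsWithSameWeight := by
  intro xs _hdom hnD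
  rw [pvAChar, pvBChar]
  refine congrArg _ (List.filter_congr ?_)
  intro i hi
  have hi' : i < xs.length - 1 := List.mem_range.mp hi
  have hsplit : pvPA xs i = (pvPB xs i && (pvW xs i != -1)) := rfl
  rw [hsplit]
  cases hc : pvPB xs i with
  | false => simp
  | true =>
    simp only [Bool.true_and]
    by_contra hne
    have hm1 : pvW xs i = -1 := by
      by_contra h'
      exact hne (by simp [h'])
    simp only [pvPB, Bool.and_eq_true, decide_eq_true_eq, beq_iff_eq, bne_iff_ne] at hc
    exact hnD ((pvD_char xs).mpr ⟨i, hc.1.1, by omega,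
      by rw [hc.1.2]; exact hm1, hm1,
      by rw [hm1] at hc; exact fun h => hc.2 h.symm⟩)

theorem getSublistsWithSameWeight_changed : Claim_changed_getSublistsWithSameWeight := by
  unfold Claim_changed_getSublistsWithSameWeight; decide

theorem getSublistsWithSameWeight_tight : Claim_exact_getSublistsWithSameWeight := by
  intro xs _hdom hD heq
  obtain ⟨i, h1i, hlt, ha, hb, hc⟩ := (pvD_char xs).mp hD
  have hpb : pvPB xs i = true := by
    simp only [pvPB, Bool.and_eq_true, decide_eq_true_eq, beq_iff_eq, bne_iff_ne]
    exact ⟨⟨h1i, by rw [ha, hb]⟩, by rw [hb]; exact fun h => hc h.symm⟩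
  have hBmem : ([(i : Int) - 1, (i : Int)] : List Int) ∈ getSublistsWithSameWeight_alt xs := by
    rw [pvBChar]
    exact List.mem_map.mpr ⟨i, List.mem_filter.mpr
      ⟨List.mem_range.mpr (by omega), hpb⟩, rfl⟩
  have hAmem : ([(i : Int) - 1, (i : Int)] : List Int) ∉ getSublistsWithSameWeight xs := by
    rw [pvAChar]
    intro hmm
    obtain ⟨j, hjf, hje⟩ := List.mem_map.mp hmm
    have hji : j = i := by
      simp only [List.cons.injEq, and_true] at hje
      exact_mod_cast hje.2
    have hjA := (List.mem_filter.mp hjf).2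
    rw [hji] at hjA
    simp only [pvPA, Bool.and_eq_true, bne_iff_ne] at hjA
    exact hjA.2 hb
  exact hAmem (heq ▸ hBmem)
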